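-- pv_equiv track=rewrite | github.com/tiagoaoa/ribault-release | scripts/dyck/digest_imb1_only.py | choose_delta_N
-- ===== SOURCE A (Python) =====
-- def choose_delta_N(rb_stats, hs_stats, arg_delta=None, arg_N=None):
--     """
--     Retorna (delta, N) comum. Regras:
--       - Se arg_delta/arg_N fornecidos, usa-os (erra se não existir em ambos).
--       - Caso contrário, tenta delta=0 se comum, senão escolhe o menor delta comum.
--       - Para o delta escolhido, pega o MAIOR N comum.
--     """
--     deltas_rb = {d for (d,_,_) in rb_stats.keys()}
--     deltas_hs = {d for (d,_,_) in hs_stats.keys()}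
--     common_delta = sorted(deltas_rb & deltas_hs)
--
--     if not common_delta:
--         raise SystemExit("[err] não há nenhum delta comum entre Ribault e Haskell (com imb=1).")
--
--     if arg_delta is not None:
--         if arg_delta not in common_delta:
--             raise SystemExit(f"[err] delta={arg_delta} não está presente em ambos os conjuntos.")
--         chosen_delta = arg_delta
--     else:
--         chosen_delta = 0 if 0 in common_delta else common_delta[0]
--
--     Ns_rb = {N for (d,N,_) in rb_stats.keys() if d==chosen_delta}
--     Ns_hs = {N for (d,N,_) in hs_stats.keys() if d==chosen_delta}
--     common_N = sorted(Ns_rb & Ns_hs)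
--     if not common_N:
--         raise SystemExit(f"[err] não há N comum para delta={chosen_delta}.")
--
--     if arg_N is not None:
--         if arg_N not in common_N:
--             raise SystemExit(f"[err] N={arg_N} não existe para delta={chosen_delta} em ambos.")
--         chosen_N = arg_N
--     else:
--         chosen_N = common_N[-1]  # maior N comum
--
--     return chosen_delta, chosen_N
-- ===== SOURCE B (Python) =====
-- def choose_delta_N(rb_stats, hs_stats, arg_delta=None, arg_N=None):
--     # One grouping pass per dict: delta -> set of Ns; then read the groups directly.
--     idx_rb = {}
--     for (d, N, _) in rb_stats.keys():
--         idx_rb.setdefault(d, set()).add(N)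
--     idx_hs = {}
--     for (d, N, _) in hs_stats.keys():
--         idx_hs.setdefault(d, set()).add(N)
--
--     common = idx_rb.keys() & idx_hs.keys()
--     if not common:
--         raise SystemExit("[err] não há nenhum delta comum entre Ribault e Haskell (com imb=1).")
--
--     if arg_delta is not None:
--         if arg_delta not in common:
--             raise SystemExit(f"[err] delta={arg_delta} não está presente em ambos os conjuntos.")
--         chosen_delta = arg_delta
--     elif 0 in common:
--         chosen_delta = 0
--     else:
--         chosen_delta = min(common)
--
--     common_N = idx_rb[chosen_delta] & idx_hs[chosen_delta]
--     if not common_N: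
--         raise SystemExit(f"[err] não há N comum para delta={chosen_delta}.")
--
--     if arg_N is not None:
--         if arg_N not in common_N:
--             raise SystemExit(f"[err] N={arg_N} não existe para delta={chosen_delta} em ambos.")
--         chosen_N = arg_N
--     else:
--         chosen_N = max(common_N)
--
--     return chosen_delta, chosen_N
-- ===== Notes on version B (the rewrite author's own statement) =====
-- stated objective: alternative
-- what changed: Replaces A's four separate set-comprehension passes (delta sets, then per-delta N filters) and the sorted() of each intersection by a single grouping pass per dict building delta->set-of-Ns indexes, whose keysets and grouped N-sets are then intersected directly, with min()/max() instead of sorting.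
import Mathlib
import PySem

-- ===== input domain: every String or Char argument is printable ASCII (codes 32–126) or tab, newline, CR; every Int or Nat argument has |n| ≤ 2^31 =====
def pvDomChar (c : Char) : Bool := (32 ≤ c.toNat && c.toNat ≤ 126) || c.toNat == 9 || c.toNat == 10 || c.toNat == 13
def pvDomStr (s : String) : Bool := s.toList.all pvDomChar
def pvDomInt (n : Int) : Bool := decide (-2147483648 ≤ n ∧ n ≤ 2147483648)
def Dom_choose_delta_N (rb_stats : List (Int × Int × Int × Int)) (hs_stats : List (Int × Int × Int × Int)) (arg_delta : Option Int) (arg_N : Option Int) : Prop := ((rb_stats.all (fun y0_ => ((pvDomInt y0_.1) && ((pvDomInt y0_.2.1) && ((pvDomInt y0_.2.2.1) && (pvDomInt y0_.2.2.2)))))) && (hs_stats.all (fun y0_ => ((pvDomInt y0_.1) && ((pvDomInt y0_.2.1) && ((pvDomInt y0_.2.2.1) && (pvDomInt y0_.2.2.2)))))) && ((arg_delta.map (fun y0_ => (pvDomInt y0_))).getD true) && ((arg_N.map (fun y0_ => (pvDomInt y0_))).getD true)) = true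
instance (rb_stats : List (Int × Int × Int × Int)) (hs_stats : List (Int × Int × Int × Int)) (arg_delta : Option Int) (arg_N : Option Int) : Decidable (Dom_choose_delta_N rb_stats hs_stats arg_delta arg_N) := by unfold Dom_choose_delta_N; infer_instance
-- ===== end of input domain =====

-- B builds one grouped index (delta -> set of Ns) per stats dict in a single pass and reads
-- intersections of keysets / grouped N-sets with min/max, instead of A's four set-comprehension
-- scans and sorted() calls; same (delta, N) result, same SystemExit conditions (excluded by Pre_).


-- ===== PORT A =====
-- second half of A (from the Ns_rb/Ns_hs comprehensions on), after chosen_delta is fixed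
def pvA_rest (rb_stats hs_stats : List (Int × Int × Int × Int)) (arg_N : Option Int) (chosen_delta : Int) : Int × Int :=
  let ns_rb : PySem.Set Int := PySem.Set.ofList ((rb_stats.filter (fun q => q.1 == chosen_delta)).map (fun q => q.2.1))
  let ns_hs : PySem.Set Int := PySem.Set.ofList ((hs_stats.filter (fun q => q.1 == chosen_delta)).map (fun q => q.2.1))
  let common_N := PySem.List.sorted (PySem.Set.inter ns_rb ns_hs) (fun x => x) false
  if common_N = [] then (0, 0)  -- SystemExit (excluded by Pre_)
  else
    match arg_N with
    | some n => if n ∈ common_N then (chosen_delta, n) else (0, 0)  -- second case: SystemExit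
    | none => (chosen_delta, common_N.getLastD 0)  -- common_N[-1]; list nonempty here

def choose_delta_N (rb_stats : List (Int × Int × Int × Int)) (hs_stats : List (Int × Int × Int × Int)) (arg_delta : Option Int) (arg_N : Option Int) : Int × Int :=
  let deltas_rb : PySem.Set Int := PySem.Set.ofList (rb_stats.map (fun q => q.1))
  let deltas_hs : PySem.Set Int := PySem.Set.ofList (hs_stats.map (fun q => q.1))
  let common_delta := PySem.List.sorted (PySem.Set.inter deltas_rb deltas_hs) (fun x => x) false
  if common_delta = [] then (0, 0)  -- SystemExit (excluded by Pre_)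
  else
    match arg_delta with
    | some d => if d ∈ common_delta then pvA_rest rb_stats hs_stats arg_N d else (0, 0)  -- SystemExit
    | none => pvA_rest rb_stats hs_stats arg_N (if (0 : Int) ∈ common_delta then 0 else common_delta.headD 0)

-- ===== PORT B =====
-- one grouping pass: for (d, N, _) in stats.keys(): idx.setdefault(d, set()).add(N)
def pvB_group (l : List (Int × Int × Int × Int)) : PySem.Dict Int (PySem.Set Int) :=
  l.foldl (fun d q => d.modify q.1 [] (fun s => PySem.Set.add s q.2.1)) PySem.Dict.empty

-- second half of B: read both groups for chosen_delta, intersect, pick N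
def pvB_rest (idx_rb idx_hs : PySem.Dict Int (PySem.Set Int)) (arg_N : Option Int) (chosen_delta : Int) : Int × Int :=
  let common_N := PySem.Set.inter (idx_rb.getD chosen_delta PySem.Set.empty) (idx_hs.getD chosen_delta PySem.Set.empty)
  if common_N = [] then (0, 0)  -- SystemExit (excluded by Pre_)
  else
    match arg_N with
    | some n => if n ∈ common_N then (chosen_delta, n) else (0, 0)  -- second case: SystemExit
    | none => (chosen_delta, (PySem.List.max? common_N (fun x => x)).getD 0)  -- max(common_N)

def choose_delta_N_alt (rb_stats : List (Int × Int × Int × Int)) (hs_stats : List (Int × Int × Int × Int)) (arg_delta : Option Int) (arg_N : Option Int) : Int × Int :=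
  let idx_rb := pvB_group rb_stats
  let idx_hs := pvB_group hs_stats
  let common := PySem.Set.inter idx_rb.keys idx_hs.keys
  if common = [] then (0, 0)  -- SystemExit (excluded by Pre_)
  else
    match arg_delta with
    | some d => if d ∈ common then pvB_rest idx_rb idx_hs arg_N d else (0, 0)  -- SystemExit
    | none =>
        if (0 : Int) ∈ common then pvB_rest idx_rb idx_hs arg_N 0
        else pvB_rest idx_rb idx_hs arg_N ((PySem.List.min? common (fun x => x)).getD 0)  -- min(common)

-- ===== PRECONDITION & SPEC =====
-- helpers used only to state Pre_: common deltas, the delta the rules pick, common Ns for it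
def pvCommonDeltas (rb_stats hs_stats : List (Int × Int × Int × Int)) : List Int :=
  PySem.Set.inter (PySem.Set.ofList (rb_stats.map (fun q => q.1))) (PySem.Set.ofList (hs_stats.map (fun q => q.1)))
def pvChosenDelta (rb_stats hs_stats : List (Int × Int × Int × Int)) (arg_delta : Option Int) : Int :=
  match arg_delta with
  | some d => d
  | none => if (0 : Int) ∈ pvCommonDeltas rb_stats hs_stats then 0
            else (PySem.List.min? (pvCommonDeltas rb_stats hs_stats) (fun x => x)).getD 0
def pvCommonNs (rb_stats hs_stats : List (Int × Int × Int × Int)) (c : Int) : List Int :=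
  PySem.Set.inter (PySem.Set.ofList ((rb_stats.filter (fun q => q.1 == c)).map (fun q => q.2.1)))
                  (PySem.Set.ofList ((hs_stats.filter (fun q => q.1 == c)).map (fun q => q.2.1)))

-- Pre_ = exactly the inputs on which A returns normally (its four SystemExit conditions negated)
def Pre_choose_delta_N (rb_stats : List (Int × Int × Int × Int)) (hs_stats : List (Int × Int × Int × Int)) (arg_delta : Option Int) (arg_N : Option Int) : Prop :=
  pvCommonDeltas rb_stats hs_stats ≠ [] ∧
  ((arg_delta.map (fun d => decide (d ∈ pvCommonDeltas rb_stats hs_stats))).getD true) = true ∧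
  pvCommonNs rb_stats hs_stats (pvChosenDelta rb_stats hs_stats arg_delta) ≠ [] ∧
  ((arg_N.map (fun n => decide (n ∈ pvCommonNs rb_stats hs_stats (pvChosenDelta rb_stats hs_stats arg_delta)))).getD true) = true
instance (rb_stats : List (Int × Int × Int × Int)) (hs_stats : List (Int × Int × Int × Int)) (arg_delta : Option Int) (arg_N : Option Int) : Decidable (Pre_choose_delta_N rb_stats hs_stats arg_delta arg_N) := by unfold Pre_choose_delta_N; infer_instance

def pvWitness_choose_delta_N : (List (Int × Int × Int × Int)) × (List (Int × Int × Int × Int)) × Option Int × Option Int :=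
  ([(0, 4, 1, 7), (1, 4, 1, 3)], [(0, 4, 1, 2), (0, 2, 1, 5)], none, none)

def Spec_choose_delta_N (rb_stats : List (Int × Int × Int × Int)) (hs_stats : List (Int × Int × Int × Int)) (arg_delta : Option Int) (arg_N : Option Int) (out : Int × Int) : Prop := out = choose_delta_N_alt rb_stats hs_stats arg_delta arg_N
instance (rb_stats : List (Int × Int × Int × Int)) (hs_stats : List (Int × Int × Int × Int)) (arg_delta : Option Int) (arg_N : Option Int) (out : Int × Int) : Decidable (Spec_choose_delta_N rb_stats hs_stats arg_delta arg_N out) := by unfold Spec_choose_delta_N; infer_instance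

-- ===== CLAIM (what is proved, stated in full; the proofs are below) =====
def Claim_equal_choose_delta_N : Prop := ∀ (rb_stats : List (Int × Int × Int × Int)) (hs_stats : List (Int × Int × Int × Int)) (arg_delta : Option Int) (arg_N : Option Int), Dom_choose_delta_N rb_stats hs_stats arg_delta arg_N → Pre_choose_delta_N rb_stats hs_stats arg_delta arg_N → Spec_choose_delta_N rb_stats hs_stats arg_delta arg_N (choose_delta_N rb_stats hs_stats arg_delta arg_N)

-- ===== LEMMAS AND PROOFS =====

-- B's grouped index has exactly A's delta set as its key list
theorem pvB_group_keys (l : List (Int × Int × Int × Int)) :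
    (pvB_group l).keys = PySem.Set.ofList (l.map (fun q => q.1)) := by
  unfold pvB_group
  rw [PySem.Dict.keys_foldl_modify_key]
  simp [PySem.Dict.keys_empty, PySem.Set.update_nil_left]

-- generalized invariant of the grouping fold, over any starting dict
theorem pvB_group_getD_gen (l : List (Int × Int × Int × Int)) (d : PySem.Dict Int (PySem.Set Int)) (c : Int) :
    (l.foldl (fun dd q => dd.modify q.1 [] (fun s => PySem.Set.add s q.2.1)) d).getD c [] =
    ((l.filter (fun q => q.1 == c)).map (fun q => q.2.1)).foldl PySem.Set.add (d.getD c []) := by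
  induction l generalizing d with
  | nil => simp
  | cons q t ih =>
    simp only [List.foldl_cons, List.filter_cons]
    rw [ih, PySem.Dict.getD_modify]
    by_cases h : q.1 = c
    · simp [h]
    · simp [h, Ne.symm h]

-- B's group for a delta is exactly A's per-delta N set
theorem pvB_group_getD (l : List (Int × Int × Int × Int)) (c : Int) :
    (pvB_group l).getD c PySem.Set.empty =
      PySem.Set.ofList ((l.filter (fun q => q.1 == c)).map (fun q => q.2.1)) := by
  show (l.foldl (fun dd q => dd.modify q.1 [] (fun s => PySem.Set.add s q.2.1)) PySem.Dict.empty).getD c [] = _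
  rw [pvB_group_getD_gen, PySem.Set.ofList_eq_foldl]
  simp [PySem.Dict.getD_empty]

-- head of sorted(xs) is min(xs)
theorem headD_sorted_eq_min (xs : List Int) (h : xs ≠ []) :
    (PySem.List.sorted xs (fun x => x) false).headD 0 = (PySem.List.min? xs (fun x => x)).getD 0 := by
  obtain ⟨m, t, hs⟩ : ∃ m t, PySem.List.sorted xs (fun x => x) false = m :: t := by
    cases hE : PySem.List.sorted xs (fun x => x) false with
    | nil => exact absurd ((PySem.List.sorted_eq_nil_iff xs _ false).mp hE) h
    | cons a b => exact ⟨a, b, rfl⟩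
  obtain ⟨mm, hmm⟩ : ∃ mm, PySem.List.min? xs (fun x => x) = some mm := by
    cases hE : PySem.List.min? xs (fun x => x) with
    | none => exact absurd ((PySem.List.min?_eq_none_iff xs _).mp hE) h
    | some a => exact ⟨a, rfl⟩
  rw [hs, hmm]
  have hmem : m ∈ xs := (PySem.List.mem_sorted xs _ false m).mp (hs ▸ List.mem_cons_self)
  have h1 : m ≤ mm := PySem.List.key_head_sorted_le xs _ hs mm (PySem.List.min?_mem hmm)
  have h2 : mm ≤ m := PySem.List.min?_isMin hmm m hmem
  simp [le_antisymm h2 h1]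

-- in a ≤-sorted list every member is ≤ the last element
theorem pw_le_getLastD (l : List Int) (hp : l.Pairwise (· ≤ ·)) : ∀ y ∈ l, y ≤ l.getLastD 0 := by
  induction l with
  | nil => simp
  | cons a t ih =>
    rcases List.pairwise_cons.mp hp with ⟨ha, ht⟩
    intro y hy
    cases t with
    | nil => simp at hy; simp [hy, List.getLastD]
    | cons b u =>
      have hgl : (a :: b :: u).getLastD 0 = (b :: u).getLastD 0 := by
        simp [List.getLastD_eq_getLast?, List.getLast?_eq_some_getLast (l := b :: u) (by simp)]
      rw [hgl]
      rcases List.mem_cons.mp hy with rfl | hy'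
      · have hm : (b :: u).getLastD 0 ∈ b :: u := by
          rw [List.getLastD_eq_getLast?, List.getLast?_eq_some_getLast (by simp)]
          exact List.getLast_mem _
        exact ha _ hm
      · exact ih ht y hy'

-- last of sorted(xs) is max(xs)
theorem getLastD_sorted_eq_max (xs : List Int) (h : xs ≠ []) :
    (PySem.List.sorted xs (fun x => x) false).getLastD 0 = (PySem.List.max? xs (fun x => x)).getD 0 := by
  obtain ⟨mm, hmm⟩ : ∃ mm, PySem.List.max? xs (fun x => x) = some mm := by
    cases hE : PySem.List.max? xs (fun x => x) with
    | none => exact absurd ((PySem.List.max?_eq_none_iff xs _).mp hE) h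
    | some a => exact ⟨a, rfl⟩
  rw [hmm]
  have hsne : PySem.List.sorted xs (fun x => x) false ≠ [] := by
    simp [PySem.List.sorted_eq_nil_iff, h]
  have hpw : (PySem.List.sorted xs (fun x => x) false).Pairwise (· ≤ ·) :=
    PySem.List.sorted_pairwise xs (fun x => x)
  have hglmem : (PySem.List.sorted xs (fun x => x) false).getLastD 0 ∈ xs := by
    rw [← PySem.List.mem_sorted xs (fun x => x) false]
    rw [List.getLastD_eq_getLast?, List.getLast?_eq_some_getLast hsne]
    simp [List.getLast_mem]
  have hmmem : mm ∈ PySem.List.sorted xs (fun x => x) false :=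
    (PySem.List.mem_sorted xs _ false mm).mpr (PySem.List.max?_mem hmm)
  have h1 : (PySem.List.sorted xs (fun x => x) false).getLastD 0 ≤ mm :=
    PySem.List.max?_isMax hmm _ hglmem
  have h2 : mm ≤ (PySem.List.sorted xs (fun x => x) false).getLastD 0 := pw_le_getLastD _ hpw mm hmmem
  simpa using le_antisymm h1 h2

-- generic: A's sorted-list tail computation equals B's set computation, any common list C
theorem core_N (C : List Int) (an : Option Int) (c : Int) :
    (if PySem.List.sorted C (fun x => x) false = [] then ((0 : Int), (0 : Int))
     else match an with
       | some n => if n ∈ PySem.List.sorted C (fun x => x) false then (c, n) else (0, 0)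
       | none => (c, (PySem.List.sorted C (fun x => x) false).getLastD 0)) =
    (if C = [] then (0, 0)
     else match an with
       | some n => if n ∈ C then (c, n) else (0, 0)
       | none => (c, (PySem.List.max? C (fun x => x)).getD 0)) := by
  by_cases hC : C = []
  · simp [hC, PySem.List.sorted_eq_nil_iff]
  · rw [if_neg (by simp [PySem.List.sorted_eq_nil_iff, hC]), if_neg hC]
    cases an with
    | none => rw [getLastD_sorted_eq_max C hC]
    | some n => simp only [PySem.List.mem_sorted]

-- the two second halves agree once chosen_delta is fixed
theorem rest_eq (rb hs : List (Int × Int × Int × Int)) (an : Option Int) (c : Int) :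
    pvA_rest rb hs an c = pvB_rest (pvB_group rb) (pvB_group hs) an c := by
  unfold pvA_rest pvB_rest
  rw [pvB_group_getD, pvB_group_getD]
  exact core_N _ an c

-- generic: A's sorted-delta choice equals B's set-based choice, given equal tails
theorem core_delta (C : List Int) (ad : Option Int) (fA fB : Int → Int × Int)
    (hf : ∀ c, fA c = fB c) :
    (if PySem.List.sorted C (fun x => x) false = [] then ((0 : Int), (0 : Int))
     else match ad with
       | some d => if d ∈ PySem.List.sorted C (fun x => x) false then fA d else (0, 0)
       | none => fA (if (0 : Int) ∈ PySem.List.sorted C (fun x => x) false then 0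
                     else (PySem.List.sorted C (fun x => x) false).headD 0)) =
    (if C = [] then (0, 0)
     else match ad with
       | some d => if d ∈ C then fB d else (0, 0)
       | none => if (0 : Int) ∈ C then fB 0 else fB ((PySem.List.min? C (fun x => x)).getD 0)) := by
  by_cases hC : C = []
  · simp [hC, PySem.List.sorted_eq_nil_iff]
  · rw [if_neg (by simp [PySem.List.sorted_eq_nil_iff, hC]), if_neg hC]
    cases ad with
    | some d =>
      simp only [PySem.List.mem_sorted]
      by_cases hd : d ∈ C
      · rw [if_pos hd, if_pos hd, hf]
      · rw [if_neg hd, if_neg hd]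
    | none =>
      simp only [PySem.List.mem_sorted]
      by_cases h0 : (0 : Int) ∈ C
      · rw [if_pos h0, if_pos h0, hf]
      · rw [if_neg h0, if_neg h0, headD_sorted_eq_min C hC, hf]

-- ===== VERDICT (by name: the statement is the Claim_ definition above) =====
theorem choose_delta_N_spec : Claim_equal_choose_delta_N := by
  intro rb hs ad an _ _
  unfold Spec_choose_delta_N choose_delta_N choose_delta_N_alt
  simp only [pvB_group_keys]
  exact core_delta _ ad _ _ (fun c => rest_eq rb hs an c)
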